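-- pv_equiv track=rewrite | github.com/davewalker5/NetworkCalculator | src/ipv4/ipv4_utils.py | calculate_network_bits
-- ===== SOURCE A (Python) =====
-- def validate_octets(octets):
--     """
--     Validate that a list of decimal octets represent a valid IPv4 address or subnet mask
--
--     :param octets: List of decimal octets
--     """
--     if len(octets) != 4:
--         raise ValueError(f"{'.'.join([str(o) for o in octets])} is not a valid IPv4 address")
--
--     invalid_type = [o for o in octets if type(o).__name__ != "int"]
--     if invalid_type:
--         raise ValueError(f"{'.'.join([str(o) for o in octets])} is not a valid IPv4 address")
--
--     out_of_range = [o for o in octets if o < 0 or o > 255]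
--     if out_of_range:
--         raise ValueError(f"{'.'.join([str(o) for o in octets])} is not a valid IPv4 address")
--
-- def calculate_network_bits(octets):
--     """
--     Given a set of decimal octets representing a subnet mask, return the number of network
--     bits
--
--     :param octets: List of decimal octets
--     :return: Number of network bits
--     """
--     validate_octets(octets)
--
--     bits = 0
--     for octet in octets:
--         if octet == 255:
--             bits = bits + 8
--         else:
--             binary = bin(octet).replace("0b", "").zfill(8)
--             bits = bits + binary.find("0")
--             break
--
--     return bits
-- ===== SOURCE B (Python) =====
-- def validate_octets(octets):
--     """
--     Validate that a list of decimal octets represent a valid IPv4 address or subnet mask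
--
--     :param octets: List of decimal octets
--     """
--     if len(octets) != 4:
--         raise ValueError(f"{'.'.join([str(o) for o in octets])} is not a valid IPv4 address")
--
--     invalid_type = [o for o in octets if type(o).__name__ != "int"]
--     if invalid_type:
--         raise ValueError(f"{'.'.join([str(o) for o in octets])} is not a valid IPv4 address")
--
--     out_of_range = [o for o in octets if o < 0 or o > 255]
--     if out_of_range:
--         raise ValueError(f"{'.'.join([str(o) for o in octets])} is not a valid IPv4 address")
--
--
-- def calculate_network_bits(octets):
--     """
--     Given a set of decimal octets representing a subnet mask, return the number of network
--     bits
--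
--     :param octets: List of decimal octets
--     :return: Number of network bits
--     """
--     validate_octets(octets)
--
--     mask = "".join(bin(o)[2:].zfill(8) for o in octets)
--     i = mask.find("0")
--     return 32 if i == -1 else i
-- ===== Notes on version B (the rewrite author's own statement) =====
-- stated objective: simpler
-- what changed: Replaces the per-octet loop with its 255 special-case, break and running counter by building the full 32-character binary mask string once and returning the index of its first '0' (32 if none).
import Mathlib
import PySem

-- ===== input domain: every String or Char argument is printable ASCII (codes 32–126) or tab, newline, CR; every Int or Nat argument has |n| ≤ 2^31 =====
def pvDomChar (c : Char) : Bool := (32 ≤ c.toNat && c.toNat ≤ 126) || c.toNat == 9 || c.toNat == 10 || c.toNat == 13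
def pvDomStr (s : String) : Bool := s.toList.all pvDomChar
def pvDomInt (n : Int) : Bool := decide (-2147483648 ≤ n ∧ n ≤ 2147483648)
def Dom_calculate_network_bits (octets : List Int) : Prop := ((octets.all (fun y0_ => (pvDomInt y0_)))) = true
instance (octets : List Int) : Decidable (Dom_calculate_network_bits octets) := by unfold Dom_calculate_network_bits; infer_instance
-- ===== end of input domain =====

-- B replaces A's per-octet loop (255 special-case, break, running counter) by building the full
-- 32-char binary mask string once and returning the index of its first '0' (32 if none): simpler decomposition.


set_option maxRecDepth 20000

-- ===== PORT A =====
-- bin(octet).replace("0b", "").zfill(8)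
def pvBinA (o : Int) : List Char :=
  PySem.Chars.zfill (PySem.Chars.replace (PySem.Int.toBinChars0b o) ['0', 'b'] []) 8

-- the 'for octet in octets' loop with its running 'bits' accumulator and the early 'break'
def pvLoopA : List Int → Int → Int
  | [], bits => bits
  | octet :: rest, bits =>
      if octet = 255 then pvLoopA rest (bits + 8)
      else bits + PySem.Chars.find (pvBinA octet) ['0']   -- bits + binary.find("0"), then break

-- validate_octets raises exactly outside Pre_; inside Pre_ it is a no-op
def calculate_network_bits (octets : List Int) : Int := pvLoopA octets 0

-- ===== PORT B =====
-- bin(o)[2:].zfill(8)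
def pvBinB (o : Int) : List Char :=
  PySem.Chars.zfill (PySem.Chars.slice (PySem.Int.toBinChars0b o) (some 2) none) 8

def calculate_network_bits_alt (octets : List Int) : Int :=
  let mask := (octets.map pvBinB).flatten      -- "".join(bin(o)[2:].zfill(8) for o in octets)
  let i := PySem.Chars.find mask ['0']         -- mask.find("0")
  if i = -1 then 32 else i

-- ===== PRECONDITION & SPEC =====
-- Pre_: exactly the inputs validate_octets accepts (4 octets, each in 0..255); A raises ValueError otherwise.
def Pre_calculate_network_bits (octets : List Int) : Prop :=
  octets.length = 4 ∧ ∀ o ∈ octets, 0 ≤ o ∧ o ≤ 255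
instance (octets : List Int) : Decidable (Pre_calculate_network_bits octets) := by
  unfold Pre_calculate_network_bits; infer_instance
def pvWitness_calculate_network_bits : List Int := [255, 255, 192, 0]

def Spec_calculate_network_bits (octets : List Int) (out : Int) : Prop := out = calculate_network_bits_alt octets
instance (octets : List Int) (out : Int) : Decidable (Spec_calculate_network_bits octets out) := by unfold Spec_calculate_network_bits; infer_instance

-- ===== CLAIM (what is proved, stated in full; the proofs are below) =====
def Claim_equal_calculate_network_bits : Prop := ∀ (octets : List Int), Dom_calculate_network_bits octets → Pre_calculate_network_bits octets → Spec_calculate_network_bits octets (calculate_network_bits octets)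

-- ===== LEMMAS AND PROOFS =====

-- [c] is a prefix of l iff l starts with c
lemma pv_single_prefix (c : Char) (l : List Char) : [c] <+: l ↔ l.head? = some c := by
  cases l with
  | nil => simp
  | cons a t => simp [List.cons_prefix_cons, eq_comm]

-- Python str.find for a single character equals List.findIdx? (-1 when absent)
lemma pv_find_single (s : List Char) (c : Char) :
    PySem.Chars.find s [c] =
      match s.findIdx? (· = c) with
      | some j => (j : Int)
      | none => -1 := by
  cases h : s.findIdx? (· = c) with
  | none =>
      have hc : ∀ x ∈ s, ¬ (x = c) := by
        intro x hx
        have := List.findIdx?_eq_none_iff.mp h x hx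
        simpa using this
      have hni : ¬ ([c] <:+: s) := by
        intro hin
        exact hc c (hin.mem (by simp)) rfl
      simpa using (PySem.Chars.find_eq_neg_one_iff s [c]).mpr hni
  | some j =>
      obtain ⟨hj, hget, hmin⟩ := List.findIdx?_eq_some_iff_getElem.mp h
      have hgc : s[j] = c := by simpa using hget
      have hcin : [c] <:+: s := by
        have hm : c ∈ s := by rw [← hgc]; exact List.getElem_mem hj
        obtain ⟨l, r, rfl⟩ := List.append_of_mem hm
        exact ⟨l, r, by simp⟩
      have h0 : 0 ≤ PySem.Chars.find s [c] := (PySem.Chars.find_nonneg_iff s [c]).mpr hcin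
      obtain ⟨hpre, hminf⟩ := PySem.Chars.find_spec h0
      set f := (PySem.Chars.find s [c]).toNat with hf
      have hfc : s[f]? = some c := by
        rw [← List.head?_drop]; exact (pv_single_prefix c _).mp hpre
      have hflt : f < s.length := by
        by_contra hge
        simp [List.getElem?_eq_none (show s.length ≤ f by omega)] at hfc
      have h1 : ¬ f < j := by
        intro hlt
        have := hmin f hlt
        rw [List.getElem?_eq_getElem hflt] at hfc
        simp at hfc this; exact this hfc
      have h2 : ¬ j < f := by
        intro hlt
        apply hminf j hlt
        rw [pv_single_prefix, List.head?_drop, List.getElem?_eq_getElem hj, hgc]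
      have : f = j := by omega
      simp only []
      omega

-- per-octet facts, checked by kernel evaluation over the 256 possible octets
lemma pv_octet_facts : ∀ n ∈ List.range 256,
    (pvBinA (n : Int) = pvBinB (n : Int)) ∧ ((pvBinB (n : Int)).length = 8) ∧
    (n = 255 ∨ ((pvBinB (n : Int)).findIdx? (· = '0')).isSome) := by decide

lemma pv_octet_facts_int (o : Int) (h0 : 0 ≤ o) (h255 : o ≤ 255) :
    pvBinA o = pvBinB o ∧ (pvBinB o).length = 8 ∧
    (o = 255 ∨ ((pvBinB o).findIdx? (· = '0')).isSome) := by
  have ho : o = ((o.toNat : Nat) : Int) := by omega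
  have hm : o.toNat ∈ List.range 256 := by simp; omega
  obtain ⟨f1, f2, f3⟩ := pv_octet_facts o.toNat hm
  rw [ho]
  refine ⟨f1, f2, ?_⟩
  rcases f3 with h | h
  · left; omega
  · right; exact h

lemma pv_bin255 : ((pvBinB (255 : Int)).findIdx? (· = '0')) = none := by decide

-- A's accumulator loop equals "first '0' in the concatenated mask, else 8 bits per octet"
lemma pv_loop_eq (l : List Int) : ∀ (bits : Int), (∀ o ∈ l, 0 ≤ o ∧ o ≤ 255) →
    pvLoopA l bits =
      bits + (match ((l.map pvBinB).flatten).findIdx? (· = '0') with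
              | some j => (j : Int)
              | none => 8 * l.length) := by
  induction l with
  | nil => intro bits _; simp [pvLoopA]
  | cons o rest ih =>
      intro bits h
      obtain ⟨hA, hlen, hor⟩ :=
        pv_octet_facts_int o (h o (by simp)).1 (h o (by simp)).2
      by_cases ho : o = 255
      · subst ho
        have hrest : ∀ o ∈ rest, 0 ≤ o ∧ o ≤ 255 := fun o hm => h o (by simp [hm])
        simp only [pvLoopA, List.map_cons, List.flatten_cons,
          List.findIdx?_append, pv_bin255, Option.none_or, ih (bits + 8) hrest]
        cases hfi : ((rest.map pvBinB).flatten).findIdx? (· = '0') with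
        | some j => simp [hlen]; ring
        | none => simp [hlen]; ring
      · rcases hor with h255 | hsome
        · exact absurd h255 ho
        obtain ⟨j, hj⟩ := Option.isSome_iff_exists.mp hsome
        simp only [pvLoopA, if_neg ho, List.map_cons, List.flatten_cons,
          List.findIdx?_append, Option.some_or, hA, pv_find_single, hj]

-- ===== VERDICT (by name: the statement is the Claim_ definition above) =====
theorem calculate_network_bits_spec : Claim_equal_calculate_network_bits := by
  intro octets _ hpre
  obtain ⟨hlen, hval⟩ := hpre
  unfold Spec_calculate_network_bits calculate_network_bits calculate_network_bits_alt
  dsimp only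
  rw [pv_loop_eq octets 0 hval, pv_find_single]
  cases hfi : ((octets.map pvBinB).flatten).findIdx? (· = '0') with
  | some j =>
      have : (j : Int) ≠ -1 := by omega
      simp [this]
  | none => simp [hlen]
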